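-- pv_equiv track=rewrite | github.com/Habibnasir23/Dining-Hall-Menu-Tracker-and-SMS-Notifier | dinningHallMenuAlert.py | breakfast
-- ===== SOURCE A (Python) =====
-- def breakfast(full_menu):
--     bf_list = []  # an empty list to store breakfast menu
--     for elem in full_menu:  # loops through the entire list until stopping condition is met
--         if elem != ' LUNCH':  # stops when encounters the 'LUNCH' keyword
--             bf_list.append(elem.strip())
--         else:
--             break
--     return bf_list
-- ===== SOURCE B (Python) =====
-- def breakfast(full_menu):
--     try:
--         idx = full_menu.index(' LUNCH')
--     except ValueError:
--         idx = len(full_menu)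
--     return [e.strip() for e in full_menu[:idx]]
-- ===== Notes on version B (the rewrite author's own statement) =====
-- stated objective: idiomatic
-- what changed: Replaces the accumulate-or-break loop with a find-the-LUNCH-boundary step followed by a strip comprehension over the prefix slice.
import Mathlib
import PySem

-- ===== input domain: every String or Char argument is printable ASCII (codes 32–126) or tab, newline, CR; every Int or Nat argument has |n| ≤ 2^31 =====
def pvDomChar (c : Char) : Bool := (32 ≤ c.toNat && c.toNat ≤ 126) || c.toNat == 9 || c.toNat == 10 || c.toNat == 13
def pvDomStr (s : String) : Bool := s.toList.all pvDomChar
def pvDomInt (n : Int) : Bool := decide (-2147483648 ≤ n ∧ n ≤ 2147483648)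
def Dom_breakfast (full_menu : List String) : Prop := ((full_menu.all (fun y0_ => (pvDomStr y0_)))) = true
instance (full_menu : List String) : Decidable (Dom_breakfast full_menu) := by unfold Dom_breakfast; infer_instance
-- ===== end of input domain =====

-- ===== PORT A =====
-- one honest line: B finds the ' LUNCH' boundary first, then strips the prefix slice (idiomatic decomposition, same cost)
def breakfast : List String → List String
  | [] => []
  | elem :: rest =>
    if elem ≠ " LUNCH" then PySem.Str.strip elem :: breakfast rest
    else []

-- ===== PORT B =====
def breakfast_alt (full_menu : List String) : List String :=
  let idx : Nat :=
    match PySem.List.index? full_menu " LUNCH" with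
    | some i => i
    | none => full_menu.length
  (PySem.List.slice full_menu none (some (idx : Int))).map PySem.Str.strip

-- ===== PRECONDITION & SPEC =====
def Spec_breakfast (full_menu : List String) (out : List String) : Prop := out = breakfast_alt full_menu
instance (full_menu : List String) (out : List String) : Decidable (Spec_breakfast full_menu out) := by unfold Spec_breakfast; infer_instance

-- ===== CLAIM (what is proved, stated in full; the proofs are below) =====
def Claim_equal_breakfast : Prop := ∀ (full_menu : List String), Dom_breakfast full_menu → Spec_breakfast full_menu (breakfast full_menu)

-- ===== LEMMAS AND PROOFS =====

theorem breakfast_alt_take (l : List String) :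
    breakfast_alt l =
      (l.take (match PySem.List.index? l " LUNCH" with
               | some i => i
               | none => l.length)).map PySem.Str.strip := by
  rw [breakfast_alt, PySem.List.slice_to_natCast]

theorem breakfast_eq (full_menu : List String) : breakfast full_menu = breakfast_alt full_menu := by
  induction full_menu with
  | nil => simp [breakfast, breakfast_alt_take]
  | cons e rest ih =>
    rw [breakfast_alt_take]
    by_cases he : e = " LUNCH"
    · subst he
      rw [PySem.List.index?_cons_self]
      simp [breakfast]
    · rw [PySem.List.index?_cons_of_ne rest he]
      rw [breakfast, if_pos (by simpa using he), ih, breakfast_alt_take]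
      cases h : PySem.List.index? rest " LUNCH" with
      | some i => simp [h]
      | none => simp [h]

-- ===== VERDICT (by name: the statement is the Claim_ definition above) =====
theorem breakfast_spec : Claim_equal_breakfast := by
  intro full_menu _
  unfold Spec_breakfast
  exact breakfast_eq full_menu
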